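-- pv_equiv track=rewrite | github.com/isLinXu/under-one | underone/skills/shuangquanshou/scripts/dna_validator.py | _preview_state
-- ===== SOURCE A (Python) =====
-- def _preview_state(state, patch):
--     if not isinstance(state, dict):
--         return patch if isinstance(patch, dict) else {}
--     preview = dict(state)
--     for key, value in patch.items():
--         if value is None:
--             preview.pop(key, None)
--         else:
--             preview[key] = value
--     return preview
-- ===== SOURCE B (Python) =====
-- def _preview_state(state, patch):
--     if not isinstance(state, dict):
--         return patch if isinstance(patch, dict) else {}
--     dropped = {k for k, v in patch.items() if v is None}
--     kept = {k: patch.get(k, v) for k, v in state.items() if k not in dropped}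
--     added = {k: v for k, v in patch.items() if v is not None and k not in state}
--     return {**kept, **added}
-- ===== Notes on version B (the rewrite author's own statement) =====
-- stated objective: alternative
-- what changed: A mutates a copy of state in one conditional pass over patch (pop on None, set otherwise); B is declarative: it builds the set of dropped keys, then a comprehension of state's entries filtered by that set with values overridden via patch.get, then a comprehension of the fresh non-None patch entries, and merges the two disjoint dicts.
import Mathlib
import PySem

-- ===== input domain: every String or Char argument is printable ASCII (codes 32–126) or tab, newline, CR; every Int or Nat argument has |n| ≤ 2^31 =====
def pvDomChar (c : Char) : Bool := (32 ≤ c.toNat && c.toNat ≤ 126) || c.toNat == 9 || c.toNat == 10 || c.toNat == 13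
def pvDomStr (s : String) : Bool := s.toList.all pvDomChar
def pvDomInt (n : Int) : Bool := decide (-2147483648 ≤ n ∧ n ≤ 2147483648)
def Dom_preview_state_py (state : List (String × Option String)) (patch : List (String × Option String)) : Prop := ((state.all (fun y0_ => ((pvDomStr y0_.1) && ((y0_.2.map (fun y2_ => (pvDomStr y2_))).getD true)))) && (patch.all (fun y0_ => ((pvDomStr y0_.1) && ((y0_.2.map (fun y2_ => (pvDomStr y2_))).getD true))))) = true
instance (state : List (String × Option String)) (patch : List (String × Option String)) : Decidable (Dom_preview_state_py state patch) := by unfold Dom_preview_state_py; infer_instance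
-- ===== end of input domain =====

-- B replaces A's one-pass conditional mutation of a state copy (pop on None / set otherwise)
-- by a declarative construction: the dropped-key set, a filtered comprehension of state's
-- entries with values overridden via patch.get, the fresh non-None patch entries, and a merge
-- of the two disjoint dicts; same cost, different decomposition. Equivalence is about the
-- return value; neither program mutates its arguments.


-- ===== PORT A =====
-- preview = dict(state); for key, value in patch.items(): pop on None else set; return preview
def preview_state_py (state : List (String × Option String)) (patch : List (String × Option String)) : List (String × Option String) :=
  let preview := PySem.Dict.ofList state
  (patch.foldl (fun preview kv =>
      if kv.2 = none then preview.erase kv.1 else preview.insert kv.1 kv.2) preview).items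

-- ===== PORT B =====
-- dropped = {k for k, v in patch.items() if v is None}
-- kept = {k: patch.get(k, v) for k, v in state.items() if k not in dropped}
-- added = {k: v for k, v in patch.items() if v is not None and k not in state}
-- return {**kept, **added}   (kept's keys come from state, added's are not in state, so the
-- merge of the two disjoint dicts is list concatenation; patch.get on the dict patch is
-- first-match lookup on its items, i.e. (Dict.mk patch).getD)
def preview_state_py_alt (state : List (String × Option String)) (patch : List (String × Option String)) : List (String × Option String) :=
  let dropped : PySem.Set String := PySem.Set.ofList ((patch.filter (fun kv => kv.2.isNone)).map Prod.fst)
  let kept := ((PySem.Dict.ofList state).items.filter (fun kv => !(PySem.Set.contains dropped kv.1))).map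
      (fun kv => (kv.1, (PySem.Dict.mk patch).getD kv.1 kv.2))
  let added := patch.filter (fun kv => kv.2.isSome && !((PySem.Dict.ofList state).contains kv.1))
  kept ++ added

-- ===== PRECONDITION & SPEC =====
-- Pre_ excludes patch association lists with duplicate keys: they cannot arise from a Python
-- dict (the argument's type), and there the ports' lookup/fold order is an accident.
def Pre_preview_state_py (state : List (String × Option String)) (patch : List (String × Option String)) : Prop :=
  (patch.map Prod.fst).Nodup
instance (state : List (String × Option String)) (patch : List (String × Option String)) : Decidable (Pre_preview_state_py state patch) := by unfold Pre_preview_state_py; infer_instance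

def pvWitness_preview_state_py : (List (String × Option String)) × (List (String × Option String)) :=
  ([("a", some "1"), ("b", none)], [("b", some "2"), ("c", none)])

def Spec_preview_state_py (state : List (String × Option String)) (patch : List (String × Option String)) (out : List (String × Option String)) : Prop := out = preview_state_py_alt state patch
instance (state : List (String × Option String)) (patch : List (String × Option String)) (out : List (String × Option String)) : Decidable (Spec_preview_state_py state patch out) := by unfold Spec_preview_state_py; infer_instance

-- ===== CLAIM (what is proved, stated in full; the proofs are below) =====
def Claim_equal_preview_state_py : Prop := ∀ (state : List (String × Option String)) (patch : List (String × Option String)), Dom_preview_state_py state patch → Pre_preview_state_py state patch → Spec_preview_state_py state patch (preview_state_py state patch)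

-- ===== LEMMAS AND PROOFS =====

-- value each key gets after applying patch's overrides (none-entries of patch included)
def pvUpd (t : List (String × Option String)) (kv : String × Option String) : String × Option String :=
  match t.find? (fun p => p.1 == kv.1) with
  | some p => (kv.1, p.2)
  | none   => kv

-- which merged entries A's conditional pass keeps
def pvKeep (t : List (String × Option String)) (kv : String × Option String) : Bool :=
  kv.2.isSome || !((t.map Prod.fst).contains kv.1)

theorem pvKeep_nil (kv : String × Option String) : pvKeep [] kv = true := by
  simp [pvKeep]

theorem pvUpd_nil (kv : String × Option String) : pvUpd [] kv = kv := by
  simp [pvUpd]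

theorem pvUpd_fst (t : List (String × Option String)) (kv : String × Option String) :
    (pvUpd t kv).1 = kv.1 := by
  unfold pvUpd; cases h : t.find? (fun p => p.1 == kv.1) <;> simp

theorem pvUpd_cons_self (k : String) (v : Option String) (t : List (String × Option String))
    (kv : String × Option String) (h : kv.1 = k) : pvUpd ((k, v) :: t) kv = (kv.1, v) := by
  simp [pvUpd, h]

theorem pvUpd_cons_ne (k : String) (v : Option String) (t : List (String × Option String))
    (kv : String × Option String) (h : kv.1 ≠ k) : pvUpd ((k, v) :: t) kv = pvUpd t kv := by
  have : (k == kv.1) = false := by simp [Ne.symm h]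
  simp [pvUpd, this]

theorem pvUpd_not_mem (t : List (String × Option String)) (kv : String × Option String)
    (h : kv.1 ∉ t.map Prod.fst) : pvUpd t kv = kv := by
  unfold pvUpd
  cases hf : t.find? (fun p => p.1 == kv.1) with
  | none => rfl
  | some p =>
    exfalso
    have hp := List.find?_some hf
    have hm := List.mem_of_find?_eq_some hf
    exact h (by simpa [eq_of_beq hp] using List.mem_map_of_mem (f := Prod.fst) hm)

theorem erase_contains_ne {x k : String} (d : PySem.Dict String (Option String)) (h : x ≠ k) :
    (d.erase k).contains x = d.contains x := by
  simp only [PySem.Dict.erase, PySem.Dict.contains]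
  rw [List.any_filter]
  refine List.any_congr rfl ?_
  intro p
  by_cases hp : p.1 = x
  · simp [hp, h]
  · simp [hp]

theorem insert_contains_ne {x k : String} (d : PySem.Dict String (Option String))
    (v : Option String) (h : x ≠ k) : (d.insert k v).contains x = d.contains x := by
  rw [PySem.Dict.contains_insert]
  simp [h]

-- A's conditional merge loop, characterised
theorem foldA_items (t : List (String × Option String)) (d : PySem.Dict String (Option String))
    (hnd : (t.map Prod.fst).Nodup) :
    (t.foldl (fun d kv => if kv.2 = none then d.erase kv.1 else d.insert kv.1 kv.2) d).items
      = (d.items.map (pvUpd t)).filter (pvKeep t)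
        ++ t.filter (fun kv => kv.2.isSome && !(d.contains kv.1)) := by
  induction t generalizing d with
  | nil =>
    simp only [List.foldl_nil, List.filter_nil, List.append_nil]
    rw [List.map_congr_left (fun a _ => pvUpd_nil a), List.map_id',
      List.filter_congr (fun a _ => pvKeep_nil a)]
    simp
  | cons hd tl ih =>
    obtain ⟨k, v⟩ := hd
    simp only [List.map_cons, List.nodup_cons] at hnd
    obtain ⟨hk, htl⟩ := hnd
    simp only [List.foldl_cons]
    have hne : ∀ kv ∈ tl, kv.1 ≠ k :=
      fun kv hkv he => hk (he ▸ List.mem_map_of_mem (f := Prod.fst) hkv)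
    cases v with
    | none =>
      simp only [if_true]
      rw [ih _ htl]
      have hfilter : tl.filter (fun kv => kv.2.isSome && !((d.erase k).contains kv.1))
          = tl.filter (fun kv => kv.2.isSome && !(d.contains kv.1)) := by
        apply List.filter_congr
        intro kv hkv
        rw [erase_contains_ne d (hne kv hkv)]
      rw [hfilter, List.filter_cons]
      simp only [Option.isSome_none, Bool.false_and, Bool.false_eq_true, if_false]
      congr 1
      have : (d.erase k).items = d.items.filter (fun p => !(p.1 == k)) := rfl
      rw [this]
      induction d.items with
      | nil => simp
      | cons p l ihl =>
        by_cases hp : p.1 = k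
        · have hb : (p.1 == k) = true := by simp [hp]
          rw [List.filter_cons, List.map_cons]
          simp only [hb, Bool.not_true, Bool.false_eq_true, if_false]
          rw [pvUpd_cons_self k none tl p hp, List.filter_cons]
          have : pvKeep ((k, none) :: tl) (p.1, none) = false := by
            simp [pvKeep, hp]
          rw [this]
          simpa using ihl
        · have hb : (p.1 == k) = false := by simp [hp]
          rw [List.filter_cons, List.map_cons]
          simp only [hb, Bool.not_false, if_true]
          rw [List.map_cons, pvUpd_cons_ne k none tl p hp, List.filter_cons, List.filter_cons]
          have hkeep : pvKeep ((k, none) :: tl) (pvUpd tl p) = pvKeep tl (pvUpd tl p) := by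
            have h1 : (pvUpd tl p).1 = p.1 := pvUpd_fst tl p
            have hb2 : (p.1 == k) = false := by simp [hp]
            simp [pvKeep, h1, hb2]
          rw [hkeep, ihl]
    | some x =>
      simp only [reduceCtorEq, if_false]
      rw [ih _ htl]
      have hfilter : tl.filter (fun kv => kv.2.isSome && !((d.insert k (some x)).contains kv.1))
          = tl.filter (fun kv => kv.2.isSome && !(d.contains kv.1)) := by
        apply List.filter_congr
        intro kv hkv
        rw [insert_contains_ne d (some x) (hne kv hkv)]
      rw [hfilter, List.filter_cons]
      by_cases hc : d.contains k = true
      · simp only [hc, Option.isSome_some, Bool.not_true, Bool.true_and, Bool.false_eq_true,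
          if_false]
        congr 1
        rw [PySem.Dict.items_insert_of_contains _ _ hc, List.map_map]
        have hmap : d.items.map (pvUpd tl ∘ fun p => if (p.1 == k) = true then (k, some x) else p)
            = d.items.map (pvUpd ((k, some x) :: tl)) := by
          apply List.map_congr_left
          intro p _
          by_cases hp : p.1 = k
          · simp only [Function.comp, hp, beq_self_eq_true, if_true]
            rw [pvUpd_not_mem tl (k, some x) hk, pvUpd_cons_self k (some x) tl p hp, hp]
          · have : (p.1 == k) = false := by simp [hp]
            simp only [Function.comp, this, Bool.false_eq_true, if_false]
            rw [pvUpd_cons_ne k (some x) tl p hp]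
        rw [hmap]
        apply List.filter_congr
        intro q hq
        obtain ⟨p, hp, rfl⟩ := List.mem_map.mp hq
        by_cases hpk : p.1 = k
        · rw [pvUpd_cons_self k (some x) tl p hpk]
          simp [pvKeep]
        · rw [pvUpd_cons_ne k (some x) tl p hpk]
          have h1 : (pvUpd tl p).1 = p.1 := pvUpd_fst tl p
          have hb2 : (p.1 == k) = false := by simp [hpk]
          simp [pvKeep, h1, hb2]
      · have hnc : d.contains k = false := by simpa using hc
        rw [PySem.Dict.items_insert_of_not_contains _ _ hnc]
        simp only [hnc, Option.isSome_some, Bool.not_false, Bool.true_and, if_true]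
        rw [List.map_append, List.map_cons, List.map_nil, pvUpd_not_mem tl (k, some x) hk,
          List.filter_append, List.filter_cons]
        have hkeepkx : pvKeep tl (k, some x) = true := by simp [pvKeep]
        rw [hkeepkx]
        simp only [if_true, List.filter_nil]
        have hmap : d.items.map (pvUpd tl) = d.items.map (pvUpd ((k, some x) :: tl)) := by
          apply List.map_congr_left
          intro p hp
          have : p.1 ≠ k := by
            intro he
            have : d.contains k = true := by
              simp only [PySem.Dict.contains, List.any_eq_true]
              exact ⟨p, hp, by simp [he]⟩
            simp [this] at hnc
          rw [pvUpd_cons_ne k (some x) tl p this]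
        have hpred : (d.items.map (pvUpd tl)).filter (pvKeep tl)
            = (d.items.map (pvUpd ((k, some x) :: tl))).filter (pvKeep ((k, some x) :: tl)) := by
          rw [← hmap]
          apply List.filter_congr
          intro q hq
          obtain ⟨p, hp, rfl⟩ := List.mem_map.mp hq
          have h1 : (pvUpd tl p).1 = p.1 := pvUpd_fst tl p
          by_cases hpk : p.1 = k
          · have : d.contains k = true := by
              simp only [PySem.Dict.contains, List.any_eq_true]
              exact ⟨p, hp, by simp [hpk]⟩
            simp [this] at hnc
          · have hb2 : (p.1 == k) = false := by simp [hpk]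
            simp [pvKeep, h1, hb2]
        rw [hpred, List.append_assoc]
        rfl

-- pvUpd is exactly B's per-entry override (first-match lookup in patch with default)
theorem pvUpd_eq_getD (patch : List (String × Option String)) (kv : String × Option String) :
    pvUpd patch kv = (kv.1, (PySem.Dict.mk patch).getD kv.1 kv.2) := by
  unfold pvUpd
  cases hf : patch.find? (fun p => p.1 == kv.1) with
  | none => simp [PySem.Dict.getD, PySem.Dict.get?, hf]
  | some p => simp [PySem.Dict.getD, PySem.Dict.get?, hf]

-- A's keep-condition applied after the override is B's dropped-set filter
theorem pvKeep_pvUpd (patch : List (String × Option String)) (kv : String × Option String)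
    (hnd : (patch.map Prod.fst).Nodup) :
    pvKeep patch (pvUpd patch kv)
      = !(PySem.Set.contains
          (PySem.Set.ofList ((patch.filter (fun kv => kv.2.isNone)).map Prod.fst)) kv.1) := by
  have hmem : PySem.Set.contains
      (PySem.Set.ofList ((patch.filter (fun kv => kv.2.isNone)).map Prod.fst)) kv.1
      = decide (kv.1 ∈ (patch.filter (fun kv => kv.2.isNone)).map Prod.fst) := by
    simp [PySem.Set.contains, PySem.Set.mem_ofList]
  rw [hmem]
  cases hf : patch.find? (fun p => p.1 == kv.1) with
  | none =>
    have hno : ∀ p ∈ patch, p.1 ≠ kv.1 := by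
      intro p hp
      have := List.find?_eq_none.mp hf p hp
      simpa using this
    have hcon : ((patch.map Prod.fst).contains kv.1) = false := by
      simp only [List.contains_eq_any_beq, List.any_eq_false]
      intro a ha
      obtain ⟨p, hp, rfl⟩ := List.mem_map.mp ha
      have := hno p hp
      simp
      exact fun h => this h.symm
    have hnl : kv.1 ∉ (patch.filter (fun kv => kv.2.isNone)).map Prod.fst := by
      intro h
      obtain ⟨p, hp, he⟩ := List.mem_map.mp h
      exact hno p (List.mem_of_mem_filter hp) he
    unfold pvUpd
    rw [hf]
    simp only [pvKeep, hcon, hnl]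
    simp
  | some p =>
    have hp1 : p.1 = kv.1 := by simpa using List.find?_some hf
    have hpm : p ∈ patch := List.mem_of_find?_eq_some hf
    have hcon : ((patch.map Prod.fst).contains kv.1) = true := by
      simp only [List.contains_eq_any_beq, List.any_eq_true]
      exact ⟨kv.1, hp1 ▸ List.mem_map_of_mem (f := Prod.fst) hpm, by simp⟩
    unfold pvUpd
    rw [hf]
    cases hv : p.2 with
    | none =>
      have hin : kv.1 ∈ (patch.filter (fun kv => kv.2.isNone)).map Prod.fst := by
        refine List.mem_map.mpr ⟨p, List.mem_filter.mpr ⟨hpm, by simp [hv]⟩, hp1⟩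
      simp only [pvKeep, hcon, hin]
      simp
      exact hv
    | some x =>
      have hnl : kv.1 ∉ (patch.filter (fun kv => kv.2.isNone)).map Prod.fst := by
        intro h
        obtain ⟨q, hq, he⟩ := List.mem_map.mp h
        have hqm := List.mem_of_mem_filter hq
        have hqn := (List.mem_filter.mp hq).2
        have : q = p := List.inj_on_of_nodup_map hnd hqm hpm (by rw [he, hp1])
        rw [this, hv] at hqn
        simp at hqn
      simp only [pvKeep, hcon, hnl]
      simp [hv]

-- ===== VERDICT (by name: the statement is the Claim_ definition above) =====
theorem preview_state_py_spec : Claim_equal_preview_state_py := by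
  intro state patch _ hpre
  unfold Spec_preview_state_py preview_state_py preview_state_py_alt
  dsimp only
  rw [foldA_items patch _ hpre]
  congr 1
  rw [List.filter_map]
  simp only [Function.comp_def]
  rw [List.filter_congr (fun a _ => pvKeep_pvUpd patch a hpre)]
  exact List.map_congr_left (fun a _ => pvUpd_eq_getD patch a)
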